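-- pv_equiv track=rewrite | github.com/Saravanan-02/AdvocateAI | final3.py | check_keywords_in_chat
-- ===== SOURCE A (Python) =====
-- def check_keywords_in_chat(messages, keyword_terms):
--     """
--     Loops through chat history to check if keywords exist.
--     Returns True if ANY keyword is found in ANY message.
--     """
--     if not keyword_terms or not keyword_terms.strip():
--         return True  # No keywords to search for
--
--     # Split keywords and clean them
--     keywords = [term.strip().lower() for term in keyword_terms.split(',') if term.strip()]
--
--     if not keywords:
--         return True
--
--     # Search through all messages
--     for message in messages:
--         content = message.get("content", "").lower()
--         for keyword in keywords:
--             if keyword in content: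
--                 return True
--
--     return False
-- ===== SOURCE B (Python) =====
-- def check_keywords_in_chat(messages, keyword_terms):
--     """Index the cleaned keywords by first character, then make ONE left-to-right
--     sweep over each message content, consulting only the bucket of the current
--     character and checking the keyword tails as prefixes of the remaining text."""
--     pairs = []
--     for term in keyword_terms.split(','):
--         t = term.strip().lower()
--         if t:
--             pairs.append((t[0], t[1:]))
--     buckets = {}
--     for ch, rest in pairs:
--         buckets[ch] = buckets.get(ch, []) + [rest]
--     if not buckets:
--         return True
--     for message in messages:
--         content = message.get("content", "").lower()
--         while content:
--             ch, content = content[0], content[1:]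
--             for rest in buckets.get(ch, []):
--                 if content.startswith(rest):
--                     return True
--     return False
-- ===== Notes on version B (the rewrite author's own statement) =====
-- stated objective: alternative
-- what changed: B replaces A's per-keyword substring scans with a bucket index keyed by each keyword's first character and a single positional sweep over each message, checking only the matching bucket's keyword tails as prefixes of the remaining text.
import Mathlib
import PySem

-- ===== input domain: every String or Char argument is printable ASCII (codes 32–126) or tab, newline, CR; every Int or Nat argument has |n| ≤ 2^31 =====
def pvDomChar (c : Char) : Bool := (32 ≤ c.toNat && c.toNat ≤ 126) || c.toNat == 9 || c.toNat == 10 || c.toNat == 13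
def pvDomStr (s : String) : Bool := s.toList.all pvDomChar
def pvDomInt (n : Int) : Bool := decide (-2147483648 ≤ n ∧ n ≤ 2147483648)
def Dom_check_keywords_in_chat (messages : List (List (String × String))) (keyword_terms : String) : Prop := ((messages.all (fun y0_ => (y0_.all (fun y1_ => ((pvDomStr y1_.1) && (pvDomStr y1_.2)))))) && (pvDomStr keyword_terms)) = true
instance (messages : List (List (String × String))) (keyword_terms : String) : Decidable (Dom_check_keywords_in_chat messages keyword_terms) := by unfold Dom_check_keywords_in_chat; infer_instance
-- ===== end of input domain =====

-- B replaces A's per-keyword substring scans with a bucket index keyed by each keyword's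
-- first character and a single positional sweep over each message content (alternative).

-- ===== PORT A =====
-- inner 'for keyword in keywords: if keyword in content: return True'
def pvA_kwLoop (keywords : List String) (content : String) : Bool :=
  match keywords with
  | [] => false
  | k :: rest => if PySem.Str.isIn k content then true else pvA_kwLoop rest content

-- outer 'for message in messages: content = message.get("content","").lower(); …'
def pvA_msgLoop (messages : List (List (String × String))) (keywords : List String) : Bool :=
  match messages with
  | [] => false
  | m :: rest =>
    let content := PySem.Str.lower (PySem.Dict.getD (PySem.Dict.ofList m) "content" "")
    if pvA_kwLoop keywords content then true else pvA_msgLoop rest keywords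

def check_keywords_in_chat (messages : List (List (String × String))) (keyword_terms : String) : Bool :=
  if keyword_terms == "" || PySem.Str.strip keyword_terms == "" then true
  else
    let keywords := (((PySem.Chars.splitOn keyword_terms.toList [',']).map String.ofList).filter
      (fun t => PySem.Str.strip t != "")).map (fun t => PySem.Str.lower (PySem.Str.strip t))
    if keywords == [] then true
    else pvA_msgLoop messages keywords

-- ===== PORT B =====
-- 'for term in keyword_terms.split(","): t = term.strip().lower(); if t: pairs.append((t[0], t[1:]))'
def pvB_pairs (terms : List String) : List (Char × String) :=
  terms.filterMap (fun term =>
    match (PySem.Str.lower (PySem.Str.strip term)).toList with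
    | [] => none
    | ch :: tl => some (ch, String.ofList tl))

-- 'for ch, rest in pairs: buckets[ch] = buckets.get(ch, []) + [rest]'
def pvB_buckets (pairs : List (Char × String)) : PySem.Dict Char (List String) :=
  pairs.foldl (fun d p => d.modify p.1 [] (fun x => x ++ [p.2])) PySem.Dict.empty

-- 'while content: ch, content = content[0], content[1:]; for rest in buckets.get(ch, []): …'
def pvB_scan (buckets : PySem.Dict Char (List String)) (cs : List Char) : Bool :=
  match cs with
  | [] => false
  | ch :: rest =>
    if (buckets.getD ch []).any (fun t => PySem.Chars.startswith rest t.toList) then true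
    else pvB_scan buckets rest

-- 'for message in messages: content = message.get("content","").lower(); …sweep…'
def pvB_msgLoop (buckets : PySem.Dict Char (List String)) (messages : List (List (String × String))) : Bool :=
  match messages with
  | [] => false
  | m :: rest =>
    let content := PySem.Str.lower (PySem.Dict.getD (PySem.Dict.ofList m) "content" "")
    if pvB_scan buckets content.toList then true else pvB_msgLoop buckets rest

def check_keywords_in_chat_alt (messages : List (List (String × String))) (keyword_terms : String) : Bool :=
  let pairs := pvB_pairs ((PySem.Chars.splitOn keyword_terms.toList [',']).map String.ofList)
  let buckets := pvB_buckets pairs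
  if buckets.items.isEmpty then true
  else pvB_msgLoop buckets messages

-- ===== PRECONDITION & SPEC =====
def Spec_check_keywords_in_chat (messages : List (List (String × String))) (keyword_terms : String) (out : Bool) : Prop := out = check_keywords_in_chat_alt messages keyword_terms
instance (messages : List (List (String × String))) (keyword_terms : String) (out : Bool) : Decidable (Spec_check_keywords_in_chat messages keyword_terms out) := by unfold Spec_check_keywords_in_chat; infer_instance

-- ===== CLAIM (what is proved, stated in full; the proofs are below) =====
def Claim_equal_check_keywords_in_chat : Prop := ∀ (messages : List (List (String × String))) (keyword_terms : String), Dom_check_keywords_in_chat messages keyword_terms → Spec_check_keywords_in_chat messages keyword_terms (check_keywords_in_chat messages keyword_terms)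

-- ===== LEMMAS AND PROOFS =====

-- every character of every piece of splitOn comes from the split string
theorem pv_go_chars_mem (sep : List Char) (fuel : Nat) :
    ∀ (l cur : List Char) (acc : List (List Char)) (p : List Char),
      p ∈ PySem.Chars.splitOn.go sep fuel l cur acc →
      ∀ c ∈ p, c ∈ l ∨ c ∈ cur ∨ ∃ q ∈ acc, c ∈ q := by
  induction fuel with
  | zero =>
    intro l cur acc p hp c hc
    simp only [PySem.Chars.splitOn.go] at hp
    rw [List.mem_reverse, List.mem_cons] at hp
    rcases hp with h | h
    · subst h; rcases List.mem_append.1 hc with h | h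
      · right; left; simpa using h
      · left; exact h
    · right; right; exact ⟨p, h, hc⟩
  | succ fuel ih =>
    intro l cur acc p hp c hc
    match l with
    | [] =>
      simp only [PySem.Chars.splitOn.go] at hp
      rw [List.mem_reverse, List.mem_cons] at hp
      rcases hp with h | h
      · subst h; right; left; simpa using hc
      · right; right; exact ⟨p, h, hc⟩
    | ch :: rest =>
      simp only [PySem.Chars.splitOn.go] at hp
      by_cases hpre : sep.isPrefixOf (ch :: rest) = true
      · rw [if_pos hpre] at hp
        rcases ih _ _ _ _ hp c hc with h | h | ⟨q, hq, hcq⟩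
        · left; exact (List.drop_subset _ _) h
        · simp at h
        · rcases List.mem_cons.1 hq with h | h
          · subst h; right; left; simpa using hcq
          · right; right; exact ⟨q, h, hcq⟩
      · rw [if_neg hpre] at hp
        rcases ih _ _ _ _ hp c hc with h | h | ⟨q, hq, hcq⟩
        · left; exact List.mem_cons_of_mem _ h
        · rcases List.mem_cons.1 h with h | h
          · left; simp [h]
          · right; left; exact h
        · right; right; exact ⟨q, hq, hcq⟩

theorem pv_splitOn_chars_mem (cs sep p : List Char) (hp : p ∈ PySem.Chars.splitOn cs sep)
    (c : Char) (hc : c ∈ p) : c ∈ cs := by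
  have := pv_go_chars_mem sep (cs.length + 1) cs [] [] p hp c hc
  simpa using this

theorem pv_strip_eq_nil_iff (cs : List Char) :
    PySem.Chars.strip cs = [] ↔ ∀ c ∈ cs, PySem.Chars.isspace c = true := by
  unfold PySem.Chars.strip PySem.Chars.rstrip PySem.Chars.lstrip
  rw [List.reverse_eq_nil_iff, List.dropWhile_eq_nil_iff]
  constructor
  · intro h c hc
    rw [← List.takeWhile_append_dropWhile (p := PySem.Chars.isspace) (l := cs)] at hc
    rcases List.mem_append.1 hc with h' | h'
    · exact List.mem_takeWhile_imp h'
    · exact h c (List.mem_reverse.2 h')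
  · intro h c hc
    exact h c (List.dropWhile_subset _ (List.mem_reverse.1 hc))

-- if the whole keyword string strips to "", A's cleaned keyword list is empty
theorem pv_keywords_nil (kt : String) (h : PySem.Str.strip kt = "") :
    (((PySem.Chars.splitOn kt.toList [',']).map String.ofList).filter
      (fun t => PySem.Str.strip t != "")) = [] := by
  rw [List.filter_eq_nil_iff]
  intro t ht
  rcases List.mem_map.1 ht with ⟨p, hp, rfl⟩
  have hall : ∀ c ∈ kt.toList, PySem.Chars.isspace c = true := by
    rw [← pv_strip_eq_nil_iff]
    have : (PySem.Str.strip kt).toList = ("" : String).toList := by rw [h]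
    simpa [PySem.Str.strip] using this
  have hpnil : PySem.Chars.strip p = [] :=
    (pv_strip_eq_nil_iff p).2 (fun c hc => hall c (pv_splitOn_chars_mem _ _ _ hp c hc))
  simp [PySem.Str.strip, hpnil]

theorem pv_strip_empty : PySem.Str.strip "" = "" := by decide

-- cleaning (strip then lower) yields "" exactly when stripping does
theorem pv_clean_nil_iff (s : String) :
    (PySem.Str.lower (PySem.Str.strip s)).toList = [] ↔ PySem.Str.strip s = "" := by
  rw [PySem.Str.toList_lower, PySem.Chars.lower]
  rw [List.map_eq_nil_iff, ← String.toList_eq_nil_iff]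

theorem pv_kwLoop_eq_any (keywords : List String) (content : String) :
    pvA_kwLoop keywords content = keywords.any (fun k => PySem.Str.isIn k content) := by
  induction keywords with
  | nil => rfl
  | cons k rest ih =>
    simp only [pvA_kwLoop]
    split_ifs with h
    · simp only [List.any_cons, h, Bool.true_or]
    · rw [Bool.not_eq_true] at h
      simp only [List.any_cons, h, Bool.false_or, ih]

-- bucket lookup = the tails of the pairs whose first character is c, in order
theorem pv_buckets_getD (pairs : List (Char × String)) (c : Char) :
    (pvB_buckets pairs).getD c [] = (pairs.filter (fun p => p.1 == c)).map (·.2) := by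
  unfold pvB_buckets
  rw [PySem.Dict.getD_foldl_modify_append, PySem.Dict.getD_empty]
  simp

theorem pv_mem_bucket (pairs : List (Char × String)) (c : Char) (t : String) :
    t ∈ (pvB_buckets pairs).getD c [] ↔ (c, t) ∈ pairs := by
  rw [pv_buckets_getD]
  simp only [List.mem_map, List.mem_filter, beq_iff_eq]
  constructor
  · rintro ⟨⟨c', t'⟩, ⟨hm, hc⟩, ht⟩
    simp only at hc ht
    subst hc; subst ht; exact hm
  · intro hm; exact ⟨(c, t), ⟨hm, rfl⟩, rfl⟩

-- pairs correspond exactly to A's cleaned keywords split head/tail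
theorem pv_mem_pairs (terms : List String) (c : Char) (t : String) :
    (c, t) ∈ pvB_pairs terms ↔
      ∃ k ∈ (terms.filter (fun t => PySem.Str.strip t != "")).map
        (fun t => PySem.Str.lower (PySem.Str.strip t)), k.toList = c :: t.toList := by
  unfold pvB_pairs
  simp only [List.mem_filterMap, List.mem_map, List.mem_filter, bne_iff_ne, ne_eq]
  constructor
  · rintro ⟨term, hterm, hsome⟩
    rcases hcl : (PySem.Str.lower (PySem.Str.strip term)).toList with _ | ⟨ch, tl⟩
    · rw [hcl] at hsome; exact absurd hsome (by simp)
    · rw [hcl] at hsome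
      simp only [Option.some.injEq, Prod.mk.injEq] at hsome
      obtain ⟨hc, ht⟩ := hsome
      refine ⟨PySem.Str.lower (PySem.Str.strip term), ⟨term, ⟨hterm, ?_⟩, rfl⟩, ?_⟩
      · intro hnil
        rw [← pv_clean_nil_iff] at hnil
        rw [hcl] at hnil; exact absurd hnil (by simp)
      · rw [hcl, hc, ← ht, String.toList_ofList]
  · rintro ⟨k, ⟨term, ⟨hterm, hne⟩, rfl⟩, hk⟩
    refine ⟨term, hterm, ?_⟩
    rw [hk]
    simp

-- every cleaned keyword is nonempty
theorem pv_kws_ne_nil (terms : List String) (k : String)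
    (hk : k ∈ (terms.filter (fun t => PySem.Str.strip t != "")).map
      (fun t => PySem.Str.lower (PySem.Str.strip t))) : k.toList ≠ [] := by
  rcases List.mem_map.1 hk with ⟨term, hterm, rfl⟩
  rcases List.mem_filter.1 hterm with ⟨_, hne⟩
  intro h
  have := (pv_clean_nil_iff term).1 h
  simp only [this, bne_self_eq_false] at hne
  exact absurd hne (by simp)

-- the positional sweep finds a hit iff some keyword occurs as a substring
theorem pv_scan_eq_any (terms : List String) (cs : List Char) :
    pvB_scan (pvB_buckets (pvB_pairs terms)) cs =
      ((terms.filter (fun t => PySem.Str.strip t != "")).map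
        (fun t => PySem.Str.lower (PySem.Str.strip t))).any
          (fun k => PySem.Chars.isIn k.toList cs) := by
  induction cs with
  | nil =>
    simp only [pvB_scan]
    symm
    rw [List.any_eq_false]
    intro k hk hin
    rw [PySem.Chars.isIn_iff_infix, List.infix_nil] at hin
    exact pv_kws_ne_nil terms k hk hin
  | cons ch cs ih =>
    have hstep : pvB_scan (pvB_buckets (pvB_pairs terms)) (ch :: cs) =
        (((pvB_buckets (pvB_pairs terms)).getD ch []).any
          (fun t => PySem.Chars.startswith cs t.toList)
         || pvB_scan (pvB_buckets (pvB_pairs terms)) cs) := by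
      simp only [pvB_scan]
      split_ifs with h <;> simp [h]
    rw [hstep, ih]
    rw [Bool.eq_iff_iff]
    simp only [Bool.or_eq_true, List.any_eq_true, PySem.Chars.startswith,
      List.isPrefixOf_iff_prefix, PySem.Chars.isIn_iff_infix]
    constructor
    · rintro (⟨t, ht, hpre⟩ | ⟨k, hk, hinf⟩)
      · rcases (pv_mem_pairs terms ch t).1 ((pv_mem_bucket _ _ _).1 ht) with ⟨k, hk, hkl⟩
        exact ⟨k, hk, List.infix_cons_iff.2 (Or.inl (by rw [hkl]; exact List.cons_prefix_cons.2 ⟨rfl, hpre⟩))⟩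
      · exact ⟨k, hk, List.infix_cons_iff.2 (Or.inr hinf)⟩
    · rintro ⟨k, hk, hinf⟩
      rcases List.infix_cons_iff.1 hinf with hpre | hinf'
      · rcases hkl : k.toList with _ | ⟨c', tl⟩
        · exact absurd hkl (pv_kws_ne_nil terms k hk)
        · rw [hkl] at hpre
          obtain ⟨heq, htl⟩ := List.cons_prefix_cons.1 hpre
          subst heq
          exact Or.inl ⟨String.ofList tl, (pv_mem_bucket _ _ _).2
            ((pv_mem_pairs terms _ (String.ofList tl)).2 ⟨k, hk, by rw [hkl, String.toList_ofList]⟩),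
            by rw [String.toList_ofList]; exact htl⟩
      · exact Or.inr ⟨k, hk, hinf'⟩

-- the two message loops agree
theorem pv_msgLoop_eq (terms : List String) (messages : List (List (String × String))) :
    pvB_msgLoop (pvB_buckets (pvB_pairs terms)) messages =
      pvA_msgLoop messages ((terms.filter (fun t => PySem.Str.strip t != "")).map
        (fun t => PySem.Str.lower (PySem.Str.strip t))) := by
  induction messages with
  | nil => rfl
  | cons m rest ih =>
    simp only [pvB_msgLoop, pvA_msgLoop]
    rw [pv_scan_eq_any, pv_kwLoop_eq_any]
    have : ∀ k : String, PySem.Str.isIn k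
        (PySem.Str.lower (PySem.Dict.getD (PySem.Dict.ofList m) "content" "")) =
        PySem.Chars.isIn k.toList
          (PySem.Str.lower (PySem.Dict.getD (PySem.Dict.ofList m) "content" "")).toList := by
      intro k; simp [PySem.Str.isIn]
    simp only [← this]
    split_ifs with h <;> simp [ih]

-- the bucket dict is empty iff A's cleaned keyword list is empty
theorem pv_buckets_empty_iff (terms : List String) :
    (pvB_buckets (pvB_pairs terms)).items = [] ↔
      (terms.filter (fun t => PySem.Str.strip t != "")).map
        (fun t => PySem.Str.lower (PySem.Str.strip t)) = [] := by
  constructor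
  · intro h
    rw [List.eq_nil_iff_forall_not_mem]
    intro k hk
    rcases hkl : k.toList with _ | ⟨c, tl⟩
    · exact pv_kws_ne_nil terms k hk hkl
    · have hmem : (String.ofList tl) ∈ (pvB_buckets (pvB_pairs terms)).getD c [] :=
        (pv_mem_bucket _ _ _).2 ((pv_mem_pairs terms c (String.ofList tl)).2
          ⟨k, hk, by rw [hkl, String.toList_ofList]⟩)
      have : (pvB_buckets (pvB_pairs terms)).getD c [] = [] := by
        rw [PySem.Dict.getD_eq_get?_getD]
        have : (pvB_buckets (pvB_pairs terms)).get? c = none := by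
          rcases hg : (pvB_buckets (pvB_pairs terms)).get? c with _ | v
          · rfl
          · exact absurd (PySem.Dict.mem_items_of_get?_eq_some _ hg) (by rw [h]; simp)
        rw [this]; rfl
      rw [this] at hmem; exact absurd hmem (by simp)
  · intro h
    have hpairs : pvB_pairs terms = [] := by
      rw [List.eq_nil_iff_forall_not_mem]
      rintro ⟨c, t⟩ hmem
      rcases (pv_mem_pairs terms c t).1 hmem with ⟨k, hk, _⟩
      rw [h] at hk; exact absurd hk (by simp)
    rw [hpairs]; rfl

-- ===== VERDICT (by name: the statement is the Claim_ definition above) =====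
theorem check_keywords_in_chat_spec : Claim_equal_check_keywords_in_chat := by
  intro messages kt _
  show check_keywords_in_chat messages kt = check_keywords_in_chat_alt messages kt
  simp only [check_keywords_in_chat, check_keywords_in_chat_alt]
  set terms := (PySem.Chars.splitOn kt.toList [',']).map String.ofList with hterms
  by_cases hg : (kt == "" || PySem.Str.strip kt == "") = true
  · rw [if_pos hg]
    have hstrip : PySem.Str.strip kt = "" := by
      rcases Bool.or_eq_true_iff.1 hg with h | h
      · rw [beq_iff_eq.1 h]; exact pv_strip_empty
      · exact beq_iff_eq.1 h
    have hfilter := pv_keywords_nil kt hstrip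
    have hkws : (terms.filter (fun t => PySem.Str.strip t != "")).map
        (fun t => PySem.Str.lower (PySem.Str.strip t)) = [] := by
      rw [hterms, hfilter]; rfl
    rw [if_pos (by rw [List.isEmpty_iff]; exact (pv_buckets_empty_iff terms).2 hkws)]
  · rw [if_neg hg]
    by_cases hkw : (terms.filter (fun t => PySem.Str.strip t != "")).map
        (fun t => PySem.Str.lower (PySem.Str.strip t)) = []
    · rw [if_pos (by simpa using hkw),
        if_pos (by rw [List.isEmpty_iff]; exact (pv_buckets_empty_iff terms).2 hkw)]
    · rw [if_neg (by simpa using hkw),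
        if_neg (by rw [Bool.not_eq_true, List.isEmpty_eq_false_iff]
                   intro h; exact hkw ((pv_buckets_empty_iff terms).1 h)),
        pv_msgLoop_eq]
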